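-- pv_equiv track=rewrite | github.com/lucasdonaire/library-lpd | eps facul/Introdução a computação 1/alinhamento.py | pontuacao
-- ===== SOURCE A (Python) =====
-- def pontuacao(s, t, ga, la, ldif, lgap):
--     ''' (str, str, int, int, int, int) -> int
--
--     RECEBE duas strings `s` e `t` de mesmo tamanho com zero ou mais gaps
--     representando fitas de DNA; e quatro inteiros `ga`, `la`, `ldif`, `lgap`.
--
--     RETORNA a pontuação do alinhamento entre `s` e `t` calculada da seguinte
--     forma:
--
--        * dois gaps alinhados contam `ga` pontos,
--        * duas letras iguais alinhadas contam `la` pontos,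
--        * duas letras diferentes alinhadas contam `-ldif` pontos (subtrai ldif pontos) e
--        * uma letra alinhada com um gap contam `-lgap` pontos (subtrai lgap pontos).
--
--     Exemplos:
--
--     In  [1]: pontuacao('T_', 'CT', 1, 5, 6, 3)
--     Out [1]: -9
--
--     In  [2]: pontuacao('T_CGTAC', 'T_CG_TC', 1, 5, 6, 3)
--     Out [2]: 12
--
--     In  [3]: pontuacao('T_CGTAC', 'A_CG_T_', 2, 3, 5, 4)
--     Out [3]: -10
--
--     In  [4]: pontuacao('T_CGTA',  'A_CGT_', -1, 5, 3, 2)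
--     Out [4]: 9
--     '''
--     # modifique o código abaixo para conter a sua solução.
--     n = len(s)
--     pont = 0
--     for i in range(n): #s[i] gap
--
--         if s[i] == '_':
--             if t[i] == '_':
--                 pont += ga
--             else:
--                 pont -= lgap
--
--         else:  #s[i] letra
--             if t[i] == '_':
--                 pont -= lgap
--             else:
--                 if t[i] == s[i]:
--                     pont += la
--                 else:
--                     pont -= ldif
--
--     return pont
-- ===== SOURCE B (Python) =====
-- def pontuacao(s, t, ga, la, ldif, lgap):
--     n = len(s)
--     gap_s = {i for i in range(n) if s[i] == '_'}
--     gap_t = {i for i in range(n) if t[i] == '_'}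
--     matches = sum(s[i] == t[i] for i in range(n))
--     both_gap = len(gap_s & gap_t)
--     gap_letter = len(gap_s ^ gap_t)
--     equal = matches - both_gap
--     diff = n - matches - gap_letter
--     return ga * both_gap + la * equal - ldif * diff - lgap * gap_letter
-- ===== Notes on version B (the rewrite author's own statement) =====
-- stated objective: alternative
-- what changed: B never classifies a position into A's four-way branch: it builds the two gap-index sets and a raw match count in staged passes, derives the four class sizes by set intersection/symmetric-difference and arithmetic identities (equal = matches - both_gap, diff = n - matches - gap_letter), and returns one linear combination.
import Mathlib
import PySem

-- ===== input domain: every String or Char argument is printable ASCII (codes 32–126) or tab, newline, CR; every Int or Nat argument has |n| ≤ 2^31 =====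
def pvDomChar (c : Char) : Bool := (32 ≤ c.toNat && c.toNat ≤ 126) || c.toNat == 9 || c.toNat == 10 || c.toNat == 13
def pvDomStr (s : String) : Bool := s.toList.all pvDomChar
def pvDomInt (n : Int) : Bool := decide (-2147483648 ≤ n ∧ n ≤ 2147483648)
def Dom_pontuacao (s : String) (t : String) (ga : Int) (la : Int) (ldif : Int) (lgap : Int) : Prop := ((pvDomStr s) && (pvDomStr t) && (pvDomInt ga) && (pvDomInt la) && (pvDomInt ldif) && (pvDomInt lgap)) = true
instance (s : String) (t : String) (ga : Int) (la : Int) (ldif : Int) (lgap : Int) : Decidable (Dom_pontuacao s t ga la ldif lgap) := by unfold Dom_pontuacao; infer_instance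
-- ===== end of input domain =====

-- B replaces A's four-way per-position branch by staged passes: gap-index sets, a raw match
-- count, and class sizes derived by set intersection/symmetric difference plus arithmetic
-- identities (alternative decomposition; same cost).

-- ===== PORT A =====
-- A's loop over range(len(s)), accumulating the score branch by branch.
-- Under Pre_ every index is in range, so getD's default ' ' is never read.
def pontuacao (s : String) (t : String) (ga : Int) (la : Int) (ldif : Int) (lgap : Int) : Int :=
  let sl := s.toList
  let tl := t.toList
  (List.range sl.length).foldl (fun pont i =>
    if sl.getD i ' ' = '_' then
      if tl.getD i ' ' = '_' then pont + ga else pont - lgap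
    else
      if tl.getD i ' ' = '_' then pont - lgap
      else if tl.getD i ' ' = sl.getD i ' ' then pont + la else pont - ldif) 0

-- ===== PORT B =====
-- gap-index sets of s and t (distinct indices, as Python's set comprehensions build),
-- a raw match count, then intersection / symmetric-difference sizes and the identities
-- equal = nMatch - both_gap, diff = n - nMatch - gap_letter.
def pontuacao_alt (s : String) (t : String) (ga : Int) (la : Int) (ldif : Int) (lgap : Int) : Int :=
  let sl := s.toList
  let tl := t.toList
  let n := sl.length
  let gapS := (List.range n).filter (fun i => sl.getD i ' ' = '_')
  let gapT := (List.range n).filter (fun i => tl.getD i ' ' = '_')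
  let nMatch : Int := ((List.range n).filter (fun i => sl.getD i ' ' = tl.getD i ' ')).length
  let bothGap : Int := (gapS.filter (fun i => i ∈ gapT)).length
  let gapLetter : Int :=
    ((gapS.filter (fun i => i ∉ gapT)).length + (gapT.filter (fun i => i ∉ gapS)).length : ℕ)
  let equal := nMatch - bothGap
  let diff := (n : Int) - nMatch - gapLetter
  ga * bothGap + la * equal - ldif * diff - lgap * gapLetter

-- ===== PRECONDITION & SPEC =====
-- Pre_ excludes exactly the inputs where the Python A raises IndexError on t[i]
-- (t shorter than s); B indexes t[i] over the same range and raises there too.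
def Pre_pontuacao (s : String) (t : String) (ga : Int) (la : Int) (ldif : Int) (lgap : Int) : Prop :=
  s.toList.length ≤ t.toList.length

instance (s : String) (t : String) (ga : Int) (la : Int) (ldif : Int) (lgap : Int) : Decidable (Pre_pontuacao s t ga la ldif lgap) := by unfold Pre_pontuacao; infer_instance

def pvWitness_pontuacao : String × String × Int × Int × Int × Int := ("T_", "CT", 1, 5, 6, 3)

def Spec_pontuacao (s : String) (t : String) (ga : Int) (la : Int) (ldif : Int) (lgap : Int) (out : Int) : Prop := out = pontuacao_alt s t ga la ldif lgap
instance (s : String) (t : String) (ga : Int) (la : Int) (ldif : Int) (lgap : Int) (out : Int) : Decidable (Spec_pontuacao s t ga la ldif lgap out) := by unfold Spec_pontuacao; infer_instance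

-- ===== CLAIM (what is proved, stated in full; the proofs are below) =====
def Claim_equal_pontuacao : Prop := ∀ (s : String) (t : String) (ga : Int) (la : Int) (ldif : Int) (lgap : Int), Dom_pontuacao s t ga la ldif lgap → Pre_pontuacao s t ga la ldif lgap → Spec_pontuacao s t ga la ldif lgap (pontuacao s t ga la ldif lgap)

-- ===== LEMMAS AND PROOFS =====

-- A's fold expressed as a linear combination of the five branch-class counts.
theorem pv_foldA (ga la ldif lgap : Int) (f g : ℕ → Char) :
    ∀ (l : List ℕ) (p : Int),
    l.foldl (fun pont i =>
      if f i = '_' then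
        if g i = '_' then pont + ga else pont - lgap
      else
        if g i = '_' then pont - lgap
        else if g i = f i then pont + la else pont - ldif) p
    = p + ga * (l.filter (fun i => decide (f i = '_') && decide (g i = '_'))).length
        - lgap * (l.filter (fun i => decide (f i = '_') && !decide (g i = '_'))).length
        - lgap * (l.filter (fun i => decide (g i = '_') && !decide (f i = '_'))).length
        + la * (l.filter (fun i => !decide (f i = '_') && !decide (g i = '_') && decide (g i = f i))).length
        - ldif * (l.filter (fun i => !decide (f i = '_') && !decide (g i = '_') && !decide (g i = f i))).length := by
  intro l
  induction l with
  | nil => intro p; simp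
  | cons i L ih =>
    intro p
    by_cases h1 : f i = '_' <;> by_cases h2 : g i = '_' <;> by_cases h3 : g i = f i <;>
      simp [List.filter_cons, h1, h2, h3, List.foldl_cons, ih] <;> push_cast <;> ring

-- intersection of two filters of range n, as one filter
theorem pv_filter_mem (p q : ℕ → Bool) (n : ℕ) :
    ((List.range n).filter p).filter (fun i => decide (i ∈ (List.range n).filter q))
      = (List.range n).filter (fun i => p i && q i) := by
  rw [List.filter_filter]
  apply List.filter_congr
  intro i hi
  simp [List.mem_filter, List.mem_range.mp hi, Bool.and_comm]

-- set difference of two filters of range n, as one filter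
theorem pv_filter_not_mem (p q : ℕ → Bool) (n : ℕ) :
    ((List.range n).filter p).filter (fun i => decide (i ∉ (List.range n).filter q))
      = (List.range n).filter (fun i => p i && !q i) := by
  rw [List.filter_filter]
  apply List.filter_congr
  intro i hi
  simp [List.mem_filter, List.mem_range.mp hi, Bool.and_comm]

-- the match count splits into both-gap matches and equal-letter matches
theorem pv_match_split (f g : ℕ → Char) :
    ∀ l : List ℕ,
    (l.filter (fun i => decide (f i = g i))).length
      = (l.filter (fun i => decide (f i = '_') && decide (g i = '_'))).length
      + (l.filter (fun i => !decide (f i = '_') && !decide (g i = '_') && decide (g i = f i))).length := by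
  intro l
  induction l with
  | nil => simp
  | cons i L ih =>
    have h5 : ('_' = g i) = (g i = '_') := propext eq_comm
    have h6 : ('_' = f i) = (f i = '_') := propext eq_comm
    have h7 : (f i = g i) = (g i = f i) := propext eq_comm
    by_cases h1 : f i = '_' <;> by_cases h2 : g i = '_' <;> by_cases h3 : g i = f i <;>
      simp [List.filter_cons, h1, h2, h3, h5, h6, h7, ih] <;> omega

-- the five branch classes partition the index list
theorem pv_partition (f g : ℕ → Char) :
    ∀ l : List ℕ,
    l.length
      = (l.filter (fun i => decide (f i = '_') && decide (g i = '_'))).length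
      + (l.filter (fun i => decide (f i = '_') && !decide (g i = '_'))).length
      + (l.filter (fun i => decide (g i = '_') && !decide (f i = '_'))).length
      + (l.filter (fun i => !decide (f i = '_') && !decide (g i = '_') && decide (g i = f i))).length
      + (l.filter (fun i => !decide (f i = '_') && !decide (g i = '_') && !decide (g i = f i))).length := by
  intro l
  induction l with
  | nil => simp
  | cons i L ih =>
    by_cases h1 : f i = '_' <;> by_cases h2 : g i = '_' <;> by_cases h3 : g i = f i <;>
      simp [List.filter_cons, h1, h2, h3, ih] <;> omega

-- the whole equivalence, over abstract character accessors f, g and length n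
theorem pv_main (ga la ldif lgap : Int) (f g : ℕ → Char) (n : ℕ) :
    (List.range n).foldl (fun pont i =>
      if f i = '_' then
        if g i = '_' then pont + ga else pont - lgap
      else
        if g i = '_' then pont - lgap
        else if g i = f i then pont + la else pont - ldif) 0
    = (let gapS := (List.range n).filter (fun i => f i = '_')
       let gapT := (List.range n).filter (fun i => g i = '_')
       let nMatch : Int := ((List.range n).filter (fun i => f i = g i)).length
       let bothGap : Int := (gapS.filter (fun i => i ∈ gapT)).length
       let gapLetter : Int :=
         ((gapS.filter (fun i => i ∉ gapT)).length + (gapT.filter (fun i => i ∉ gapS)).length : ℕ)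
       let equal := nMatch - bothGap
       let diff := (n : Int) - nMatch - gapLetter
       ga * bothGap + la * equal - ldif * diff - lgap * gapLetter) := by
  simp only [pv_foldA ga la ldif lgap f g (List.range n) 0,
      pv_filter_mem (fun i => decide (f i = '_')) (fun i => decide (g i = '_')) n,
      pv_filter_not_mem (fun i => decide (f i = '_')) (fun i => decide (g i = '_')) n,
      pv_filter_not_mem (fun i => decide (g i = '_')) (fun i => decide (f i = '_')) n,
      pv_match_split f g (List.range n)]
  have hp := pv_partition f g (List.range n)
  rw [List.length_range] at hp
  have hz := congrArg (Nat.cast (R := ℤ)) hp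
  push_cast at hz
  push_cast
  linear_combination ldif * hz

-- ===== VERDICT (by name: the statement is the Claim_ definition above) =====
theorem pontuacao_spec : Claim_equal_pontuacao := by
  intro s t ga la ldif lgap _ _
  unfold Spec_pontuacao pontuacao pontuacao_alt
  exact pv_main ga la ldif lgap (fun i => s.toList.getD i ' ') (fun i => t.toList.getD i ' ')
    s.toList.length
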